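-- pv_equiv track=rewrite | github.com/wilocraw-alt/foodscrap | scripts/fetch_menu.py | merge_vertical_texts
-- ===== SOURCE A (Python) =====
-- def merge_vertical_texts(texts):
--     if not texts:
--         return []
--     result = []
--     buffer = ""
--     for text in texts:
--         if len(text) == 1:
--             buffer += text
--         else:
--             if buffer:
--                 result.append(buffer)
--                 buffer = ""
--             result.append(text)
--     if buffer:
--         result.append(buffer)
--     return result
-- ===== SOURCE B (Python) =====
-- def merge_vertical_texts(texts):
--     out = []
--     last_is_run = False
--     for t in reversed(texts):
--         if len(t) == 1:
--             if last_is_run: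
--                 out[-1] = t + out[-1]
--             else:
--                 out.append(t)
--                 last_is_run = True
--         else:
--             out.append(t)
--             last_is_run = False
--     out.reverse()
--     return out
-- ===== Notes on version B (the rewrite author's own statement) =====
-- stated objective: alternative
-- what changed: Builds the output back-to-front: a right-to-left traversal with no intermediate buffer merges each single-char text directly into the last emitted run (tracked by a boolean flag), then reverses the output once; A instead accumulates a buffer left-to-right and flushes it at each non-single text and at the end.
import Mathlib
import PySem

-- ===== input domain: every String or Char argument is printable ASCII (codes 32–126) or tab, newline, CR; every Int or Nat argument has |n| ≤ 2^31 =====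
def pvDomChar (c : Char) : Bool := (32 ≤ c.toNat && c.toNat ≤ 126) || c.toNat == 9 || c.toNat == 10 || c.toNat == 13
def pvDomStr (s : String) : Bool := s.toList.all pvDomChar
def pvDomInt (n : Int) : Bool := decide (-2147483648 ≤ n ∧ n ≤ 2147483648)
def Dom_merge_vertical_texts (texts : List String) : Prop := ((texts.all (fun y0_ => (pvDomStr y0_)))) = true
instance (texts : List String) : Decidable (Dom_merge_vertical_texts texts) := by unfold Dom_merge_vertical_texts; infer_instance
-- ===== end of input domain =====

-- B builds the output back-to-front: a right-to-left pass with no buffer merges single-char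
-- texts directly into the last emitted run (flag-tracked), then reverses once (alternative).


-- ===== PORT A =====
-- one loop step of A: `if len(text)==1: buffer += text else: (flush buffer); result.append(text)`
def pvStepA (st : List String × String) (text : String) : List String × String :=
  if PySem.Str.len text = 1 then (st.1, st.2 ++ text)
  else if st.2 ≠ "" then (st.1 ++ [st.2] ++ [text], "")
  else (st.1 ++ [text], st.2)

def merge_vertical_texts (texts : List String) : List String :=
  if texts = [] then []
  else
    let st := texts.foldl pvStepA ([], "")
    if st.2 ≠ "" then st.1 ++ [st.2] else st.1

-- ===== PORT B =====
-- one step of B's right-to-left loop over reversed(texts); state = (out, last_is_run).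
-- `out[-1] = t + out[-1]` is ported as dropLast ++ [t ++ getLastD]; the Python index -1 is
-- always in range there because last_is_run implies out is nonempty.
def pvStepB (st : List String × Bool) (t : String) : List String × Bool :=
  if PySem.Str.len t = 1 then
    if st.2 then (st.1.dropLast ++ [t ++ st.1.getLastD ""], true)
    else (st.1 ++ [t], true)
  else (st.1 ++ [t], false)

def merge_vertical_texts_alt (texts : List String) : List String :=
  let st := texts.reverse.foldl pvStepB ([], false)
  st.1.reverse

-- ===== PRECONDITION & SPEC =====
def Spec_merge_vertical_texts (texts : List String) (out : List String) : Prop := out = merge_vertical_texts_alt texts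
instance (texts : List String) (out : List String) : Decidable (Spec_merge_vertical_texts texts out) := by unfold Spec_merge_vertical_texts; infer_instance

-- ===== CLAIM (what is proved, stated in full; the proofs are below) =====
def Claim_equal_merge_vertical_texts : Prop := ∀ (texts : List String), Dom_merge_vertical_texts texts → Spec_merge_vertical_texts texts (merge_vertical_texts texts)

-- ===== LEMMAS AND PROOFS =====

-- is `t` a single-character text?
def pvSingle (t : String) : Bool := PySem.Str.len t == 1

-- does the list start with a single-character text? (= B's last_is_run flag, read backwards)
def pvFlag (ts : List String) : Bool := ((ts.head?).map pvSingle).getD false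

theorem pvFlag_nil : pvFlag [] = false := rfl

theorem pvFlag_cons (t : String) (ts : List String) : pvFlag (t :: ts) = pvSingle t := rfl

-- the common functional description of both programs: merge the leading single-char run into
-- the head of the recursive result
def pvG : List String → List String
  | [] => []
  | t :: ts =>
    if pvSingle t && pvFlag ts then
      match pvG ts with
      | m :: ms => (t ++ m) :: ms
      | [] => [t]
    else t :: pvG ts

theorem pvG_ne_nil (t : String) (ts : List String) : pvG (t :: ts) ≠ [] := by
  unfold pvG
  split
  · split <;> simp
  · simp

-- a nonempty-buffer append of a single-char text is nonempty
theorem pvAppend_ne_empty (b t : String) (ht : pvSingle t = true) : b ++ t ≠ "" := by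
  intro h
  have h' := congrArg String.toList h
  simp only [String.toList_append, String.toList_empty, List.append_eq_nil_iff] at h'
  have : PySem.Str.len t = 1 := by simpa [pvSingle] using ht
  simp [PySem.Str.len, h'.2] at this

-- the foldl's result-list component only grows: the accumulator is a prefix
theorem pvFoldl_prefix (ts : List String) (res : List String) (b : String) :
    List.foldl pvStepA (res, b) ts =
      (res ++ (List.foldl pvStepA ([], b) ts).1, (List.foldl pvStepA ([], b) ts).2) := by
  induction ts generalizing res b with
  | nil => simp
  | cons t ts ih =>
    simp only [List.foldl_cons]
    by_cases h1 : PySem.Str.len t = 1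
    · simp only [pvStepA, if_pos h1]
      exact ih res (b ++ t)
    · by_cases h2 : b ≠ ""
      · simp only [pvStepA, if_neg h1, if_pos h2]
        rw [ih (res ++ [b] ++ [t]) "", ih ([] ++ [b] ++ [t]) ""]
        simp
      · simp only [pvStepA, if_neg h1, if_neg h2]
        rw [ih (res ++ [t]) b, ih ([] ++ [t]) b]
        simp

-- A's loop with pending buffer b, then the final flush
def pvEmit (b : String) : List String → List String
  | [] => if b = "" then [] else [b]
  | t :: ts =>
    if pvSingle t then pvEmit (b ++ t) ts
    else (if b = "" then [] else [b]) ++ t :: pvEmit "" ts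

theorem pvA_eq_emit (ts : List String) (b : String) :
    (if (List.foldl pvStepA ([], b) ts).2 ≠ "" then
        (List.foldl pvStepA ([], b) ts).1 ++ [(List.foldl pvStepA ([], b) ts).2]
      else (List.foldl pvStepA ([], b) ts).1) = pvEmit b ts := by
  induction ts generalizing b with
  | nil =>
    by_cases h : b = "" <;> simp [pvEmit, h]
  | cons t ts ih =>
    simp only [List.foldl_cons]
    by_cases h1 : PySem.Str.len t = 1
    · have hk : pvSingle t = true := by unfold pvSingle; exact beq_iff_eq.mpr h1
      have h1' : t.length = 1 := by rw [PySem.Str.len_eq] at h1; exact_mod_cast h1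
      rw [show pvStepA ([], b) t = ([], b ++ t) from by simp [pvStepA, h1']]
      rw [show pvEmit b (t :: ts) = pvEmit (b ++ t) ts from by simp [pvEmit, hk]]
      exact ih (b ++ t)
    · have hk : pvSingle t = false := by
        unfold pvSingle; exact beq_eq_false_iff_ne.mpr h1
      have h1' : ¬ t.length = 1 := by
        rw [PySem.Str.len_eq] at h1; intro h; exact h1 (by exact_mod_cast h)
      by_cases h2 : b = ""
      · subst h2
        rw [show pvStepA ([], "") t = ([t], "") from by simp [pvStepA, h1']]
        rw [pvFoldl_prefix ts [t] ""]
        rw [show pvEmit "" (t :: ts) = t :: pvEmit "" ts from by simp [pvEmit, hk]]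
        rw [← ih ""]
        split <;> simp
      · rw [show pvStepA ([], b) t = ([b, t], "") from by simp [pvStepA, h1', h2]]
        rw [pvFoldl_prefix ts [b, t] ""]
        rw [show pvEmit b (t :: ts) = b :: t :: pvEmit "" ts from by simp [pvEmit, hk, h2]]
        rw [← ih ""]
        split <;> simp

-- B's value when a pending single-char buffer b precedes ts
def pvFlushG (b : String) (ts : List String) : List String :=
  if pvFlag ts then (b ++ (pvG ts).headD "") :: (pvG ts).tail
  else b :: pvG ts

theorem pvEmit_eq (ts : List String) (b : String) :
    pvEmit b ts = if b = "" then pvG ts else pvFlushG b ts := by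
  induction ts generalizing b with
  | nil =>
    by_cases h : b = "" <;> simp [pvEmit, pvG, pvFlushG, pvFlag_nil, h]
  | cons t ts ih =>
    by_cases hk : pvSingle t = true
    · have hne : ∀ c : String, c ++ t ≠ "" := fun c => pvAppend_ne_empty c t hk
      rw [show pvEmit b (t :: ts) = pvEmit (b ++ t) ts from by simp [pvEmit, hk]]
      rw [ih (b ++ t)]
      rw [if_neg (hne b)]
      by_cases hf : pvFlag ts = true
      · -- leading run continues into ts
        have hGcons : ∃ m ms, pvG ts = m :: ms := by
          cases ts with
          | nil => simp [pvFlag_nil] at hf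
          | cons u us =>
            cases h : pvG (u :: us) with
            | nil => exact absurd h (pvG_ne_nil u us)
            | cons m ms => exact ⟨m, ms, rfl⟩
        obtain ⟨m, ms, hG⟩ := hGcons
        have hGt : pvG (t :: ts) = (t ++ m) :: ms := by
          simp [pvG, hk, hf, hG]
        by_cases hb : b = ""
        · subst hb
          simp [pvFlushG, hf, hG, hGt]
        · simp [pvFlushG, hf, hG, hGt, hb, String.append_assoc, pvFlag_cons, hk]
      · have hf' : pvFlag ts = false := by simpa using hf
        have hGt : pvG (t :: ts) = t :: pvG ts := by
          simp [pvG, hf']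
        by_cases hb : b = ""
        · subst hb
          simp [pvFlushG, hf', hGt]
        · simp [pvFlushG, hf', hGt, hb, pvFlag_cons, hk]
    · have hk' : pvSingle t = false := by simpa using hk
      have hGt : pvG (t :: ts) = t :: pvG ts := by simp [pvG, hk']
      rw [show pvEmit b (t :: ts) =
          (if b = "" then [] else [b]) ++ t :: pvEmit "" ts from by simp [pvEmit, hk']]
      rw [ih ""]
      by_cases hb : b = ""
      · simp [hb, hGt]
      · simp [hb, hGt, pvFlushG, pvFlag, hk']

-- B's foldr form (foldl over the reversed list) computes pvG, reversed, with the flag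
theorem pvFoldrB (ts : List String) :
    ts.foldr (fun t st => pvStepB st t) ([], false) = ((pvG ts).reverse, pvFlag ts) := by
  induction ts with
  | nil => simp [pvG, pvFlag_nil]
  | cons t ts ih =>
    simp only [List.foldr_cons, ih]
    by_cases h1 : PySem.Str.len t = 1
    · have hk : pvSingle t = true := by unfold pvSingle; exact beq_iff_eq.mpr h1
      have h1' : t.length = 1 := by rw [PySem.Str.len_eq] at h1; exact_mod_cast h1
      by_cases hf : pvFlag ts = true
      · have hGcons : ∃ m ms, pvG ts = m :: ms := by
          cases ts with
          | nil => simp [pvFlag_nil] at hf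
          | cons u us =>
            cases h : pvG (u :: us) with
            | nil => exact absurd h (pvG_ne_nil u us)
            | cons m ms => exact ⟨m, ms, rfl⟩
        obtain ⟨m, ms, hG⟩ := hGcons
        have hGt : pvG (t :: ts) = (t ++ m) :: ms := by simp [pvG, hk, hf, hG]
        simp [pvStepB, h1', hf, hG, hGt, pvFlag_cons, hk]
      · have hf' : pvFlag ts = false := by simpa using hf
        have hGt : pvG (t :: ts) = t :: pvG ts := by simp [pvG, hf']
        simp [pvStepB, h1', hf', hGt, pvFlag_cons, hk]
    · have hk' : pvSingle t = false := by
        unfold pvSingle; exact beq_eq_false_iff_ne.mpr h1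
      have h1' : ¬ t.length = 1 := by
        rw [PySem.Str.len_eq] at h1; intro h; exact h1 (by exact_mod_cast h)
      have hGt : pvG (t :: ts) = t :: pvG ts := by simp [pvG, hk']
      simp [pvStepB, h1', hGt, pvFlag_cons, hk']

-- ===== VERDICT (by name: the statement is the Claim_ definition above) =====
theorem merge_vertical_texts_spec : Claim_equal_merge_vertical_texts := by
  intro texts _
  unfold Spec_merge_vertical_texts merge_vertical_texts merge_vertical_texts_alt
  rw [List.foldl_reverse]
  rw [pvFoldrB]
  simp only [List.reverse_reverse]
  by_cases h : texts = []
  · simp [h, pvG]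
  · simp only [if_neg h]
    rw [pvA_eq_emit texts "", pvEmit_eq]
    simp
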